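-- pv_equiv track=rewrite | github.com/ChipDale729/nport-viewer | html_parser.py | _pick_column_map
-- ===== SOURCE A (Python) =====
-- def _pick_column_map(labels):
--     """
--     Match common column names to standardized keys:
--       - CUSIP
--       - Name
--       - Balance
--       - Value (USD)
--     """
--     low = [lbl.lower() for lbl in labels]
--
--     def find(*alts):
--         for i, t in enumerate(low):
--             if any(a in t for a in alts):
--                 return i
--         return None
--
--     colmap = {
--         "cusip":  find("cusip"),
--         "name":   find("title", "name", "security", "issuer", "investment", "description"),
--         "balance":find("balance", "shares", "units", "par value", "quantity", "par"),
--         "value":  find("value", "val usd", "valusd", "market value", "fair value"),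
--     }
--
--     # Default: assume first column is "Name" if not explicitly labeled
--     if colmap["name"] is None:
--         colmap["name"] = 0
--
--     # Must have at least one numeric column to qualify as a holdings table
--     if colmap["balance"] is None and colmap["value"] is None:
--         return None
--
--     return colmap
-- ===== SOURCE B (Python) =====
-- def _pick_column_map(labels):
--     """
--     Match common column names to standardized keys:
--       - CUSIP
--       - Name
--       - Balance
--       - Value (USD)
--     """
--     categories = [
--         ("cusip",   ("cusip",)),
--         ("name",    ("title", "name", "security", "issuer", "investment", "description")),
--         ("balance", ("balance", "shares", "units", "par value", "quantity", "par")),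
--         ("value",   ("value", "val usd", "valusd", "market value", "fair value")),
--     ]
--     found = {key: None for key, _ in categories}
--     for i, lbl in enumerate(labels):
--         t = lbl.lower()
--         for key, kws in categories:
--             if found[key] is None and any(a in t for a in kws):
--                 found[key] = i
--     if found["name"] is None:
--         found["name"] = 0
--     if found["balance"] is None and found["value"] is None:
--         return None
--     return found
-- ===== Notes on version B (the rewrite author's own statement) =====
-- stated objective: alternative
-- what changed: Replaces A's four independent full scans of the lowered labels (one find() per category) with one single pass over the labels that maintains all four still-unset category slots at once, assigning each slot the first matching index.
import Mathlib
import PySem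

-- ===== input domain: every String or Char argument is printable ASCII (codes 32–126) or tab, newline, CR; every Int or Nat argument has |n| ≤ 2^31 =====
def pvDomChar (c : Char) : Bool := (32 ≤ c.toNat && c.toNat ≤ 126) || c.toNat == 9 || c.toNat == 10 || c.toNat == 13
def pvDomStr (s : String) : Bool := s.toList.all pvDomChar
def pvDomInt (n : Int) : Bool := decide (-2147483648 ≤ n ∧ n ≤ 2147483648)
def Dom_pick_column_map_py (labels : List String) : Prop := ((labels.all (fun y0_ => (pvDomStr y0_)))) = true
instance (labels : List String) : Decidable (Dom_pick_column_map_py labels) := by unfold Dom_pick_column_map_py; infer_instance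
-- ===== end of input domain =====

-- B replaces A's four independent find() scans by one single pass maintaining all four slots (alternative decomposition, same cost class).

-- ===== PORT A =====
-- A's inner helper `find(*alts)`: first index i of low whose entry contains any alt.
def pvFindAux (alts : List String) (low : List String) (i : Int) : Option Int :=
  match low with
  | [] => none
  | t :: rest =>
      if alts.any (fun a => PySem.Str.isIn a t) then some i
      else pvFindAux alts rest (i + 1)

def pick_column_map_py (labels : List String) : Option (List (String × Option Int)) :=
  let low := labels.map PySem.Str.lower
  let cusip := pvFindAux ["cusip"] low 0
  let name := pvFindAux ["title", "name", "security", "issuer", "investment", "description"] low 0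
  let balance := pvFindAux ["balance", "shares", "units", "par value", "quantity", "par"] low 0
  let value := pvFindAux ["value", "val usd", "valusd", "market value", "fair value"] low 0
  let name := if name = none then some 0 else name
  if balance = none ∧ value = none then none
  else some [("cusip", cusip), ("name", name), ("balance", balance), ("value", value)]

-- ===== PORT B =====
-- B's keyword lists per category.
def pvKwCusip : List String := ["cusip"]
def pvKwName : List String := ["title", "name", "security", "issuer", "investment", "description"]
def pvKwBalance : List String := ["balance", "shares", "units", "par value", "quantity", "par"]
def pvKwValue : List String := ["value", "val usd", "valusd", "market value", "fair value"]

-- `any(a in t for a in kws)`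
def pvHit (kws : List String) (t : String) : Bool := kws.any (fun a => PySem.Str.isIn a t)

-- B's single loop over enumerate(labels), carrying the four still-unset slots.
def pvScan (labels : List String) (i : Int)
    (st : Option Int × Option Int × Option Int × Option Int) :
    Option Int × Option Int × Option Int × Option Int :=
  match labels with
  | [] => st
  | lbl :: rest =>
      let t := PySem.Str.lower lbl
      let (c, n, b, v) := st
      let c := if c = none ∧ pvHit pvKwCusip t then some i else c
      let n := if n = none ∧ pvHit pvKwName t then some i else n
      let b := if b = none ∧ pvHit pvKwBalance t then some i else b
      let v := if v = none ∧ pvHit pvKwValue t then some i else v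
      pvScan rest (i + 1) (c, n, b, v)

def pick_column_map_py_alt (labels : List String) : Option (List (String × Option Int)) :=
  let (c, n, b, v) := pvScan labels 0 (none, none, none, none)
  let n := if n = none then some 0 else n
  if b = none ∧ v = none then none
  else some [("cusip", c), ("name", n), ("balance", b), ("value", v)]

-- ===== PRECONDITION & SPEC =====
def Spec_pick_column_map_py (labels : List String) (out : Option (List (String × Option Int))) : Prop := out = pick_column_map_py_alt labels
instance (labels : List String) (out : Option (List (String × Option Int))) : Decidable (Spec_pick_column_map_py labels out) := by unfold Spec_pick_column_map_py; infer_instance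

-- ===== CLAIM (what is proved, stated in full; the proofs are below) =====
def Claim_equal_pick_column_map_py : Prop := ∀ (labels : List String), Dom_pick_column_map_py labels → Spec_pick_column_map_py labels (pick_column_map_py labels)

-- ===== LEMMAS AND PROOFS =====

-- first-set-wins combination of a slot with a later scan
def pvOr (o : Option Int) (f : Option Int) : Option Int :=
  match o with
  | some x => some x
  | none => f

-- one step of a slot update commutes with the remaining scan: first-set-wins
lemma pvSlot (kws : List String) (t : String) (low : List String) (i : Int) (o : Option Int) :
    pvOr (if o = none ∧ pvHit kws t then some i else o) (pvFindAux kws low (i + 1)) =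
    pvOr o (pvFindAux kws (t :: low) i) := by
  have hh : (kws.any fun a => PySem.Str.isIn a t) = pvHit kws t := rfl
  cases o with
  | some x => simp [pvOr]
  | none =>
      simp only [pvFindAux, hh]
      cases hb : pvHit kws t <;> simp [pvOr]

-- B's single pass computes, slot by slot, exactly A's four find() results (offset by the start index).
lemma pvScan_eq (labels : List String) : ∀ (i : Int) (c n b v : Option Int),
    pvScan labels i (c, n, b, v) =
      (pvOr c (pvFindAux pvKwCusip (labels.map PySem.Str.lower) i),
       pvOr n (pvFindAux pvKwName (labels.map PySem.Str.lower) i),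
       pvOr b (pvFindAux pvKwBalance (labels.map PySem.Str.lower) i),
       pvOr v (pvFindAux pvKwValue (labels.map PySem.Str.lower) i)) := by
  induction labels with
  | nil =>
      intro i c n b v
      cases c <;> cases n <;> cases b <;> cases v <;> simp [pvScan, pvFindAux, pvOr]
  | cons lbl rest ih =>
      intro i c n b v
      simp only [pvScan, List.map_cons]
      rw [ih]
      simp only [pvSlot]

theorem pick_column_map_py_spec : Claim_equal_pick_column_map_py := by
  unfold Claim_equal_pick_column_map_py
  intro labels _
  unfold Spec_pick_column_map_py pick_column_map_py pick_column_map_py_alt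
  rw [pvScan_eq]
  simp only [pvOr, pvKwCusip, pvKwName, pvKwBalance, pvKwValue]
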